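-- pv_equiv track=rewrite | github.com/belovetech/alx-interview | 0x01-lockboxes/0-lockboxes.py | canUnlockAll2
-- ===== SOURCE A (Python) =====
-- def canUnlockAll2(boxes):
--     """Check if all boxes can be opened
--
--     Args:
--         boxes (arr[int]): Boxes contains the key to open other boxes
--
--     Return:
--         (bool): True otherwise false
--     """
--     unlocked = set()
--     for boxID, box in enumerate(boxes):
--         if len(box) == 0 or boxID == 0:
--             unlocked.add(boxID)
--         for key in box:
--             if key < len(boxes) and key != boxID:
--                 unlocked.add(key)
--     if len(unlocked) == len(boxes):
--         return True
--     return False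
-- ===== SOURCE B (Python) =====
-- def canUnlockAll2(boxes):
--     """Sort-and-scan variant: collect every 'unlock marker' (a box that starts
--     open or is empty, and every in-range key held by another box), sort the
--     markers, count the distinct ones by scanning adjacent runs, and compare
--     that count with the number of boxes."""
--     n = len(boxes)
--     marks = [j for j, box in enumerate(boxes) if j == 0 or not box]
--     marks += [k for j, box in enumerate(boxes) for k in box if k < n and k != j]
--     marks.sort()
--     distinct = 0
--     prev = None
--     for m in marks:
--         if prev is None or m != prev:
--             distinct += 1
--         prev = m
--     return distinct == n
-- ===== Notes on version B (the rewrite author's own statement) =====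
-- stated objective: alternative
-- what changed: A pushes every marker (box 0, empty boxes, in-range keys held by another box) into a growing hash set in one pass and compares its size with len(boxes); B collects the markers into a plain list, sorts it, and counts the distinct values by a scan over adjacent runs before comparing with len(boxes).
import Mathlib
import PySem

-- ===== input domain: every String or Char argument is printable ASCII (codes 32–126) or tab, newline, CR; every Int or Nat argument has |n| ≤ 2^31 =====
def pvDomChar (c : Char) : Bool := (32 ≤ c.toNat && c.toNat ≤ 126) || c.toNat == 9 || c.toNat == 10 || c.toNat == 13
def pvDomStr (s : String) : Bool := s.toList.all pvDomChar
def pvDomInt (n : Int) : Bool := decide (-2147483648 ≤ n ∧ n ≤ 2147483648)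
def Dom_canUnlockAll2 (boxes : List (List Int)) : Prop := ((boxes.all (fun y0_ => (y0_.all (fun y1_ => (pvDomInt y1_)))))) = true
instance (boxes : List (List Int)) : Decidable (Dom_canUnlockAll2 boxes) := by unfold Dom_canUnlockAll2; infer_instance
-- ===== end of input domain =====

-- B reproduces A exactly but by a different mechanism: instead of pushing markers
-- into a hash set and comparing its size, B lists all markers, sorts them, and
-- counts distinct values by scanning adjacent runs; objective: alternative.

-- ===== PORT A =====
def canUnlockAll2 (boxes : List (List Int)) : Bool :=
  let unlocked : PySem.Set Int :=
    (PySem.List.enumerate boxes 0).foldl (fun unlocked p =>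
      let unlocked := if p.2.length == 0 || p.1 == 0 then PySem.Set.add unlocked p.1 else unlocked
      p.2.foldl (fun unlocked key =>
        if key < (boxes.length : Int) && key != p.1 then PySem.Set.add unlocked key else unlocked)
        unlocked)
      PySem.Set.empty
  if PySem.Set.len unlocked == (boxes.length : Int) then true else false

-- ===== PORT B =====
def canUnlockAll2_alt (boxes : List (List Int)) : Bool :=
  let n := boxes.length
  let marks : List Int :=
    ((PySem.List.enumerate boxes 0).filter (fun p => p.1 == 0 || p.2.isEmpty)).map (fun p => p.1)
      ++ (PySem.List.enumerate boxes 0).flatMap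
        (fun p => p.2.filter (fun k => k < (n : Int) && k != p.1))
  let marks := PySem.List.sorted marks (fun x => x) false
  -- the scan: distinct starts at 0, prev at None; each new value bumps distinct
  let st := marks.foldl (fun (st : Int × Option Int) m =>
      (if st.2.isNone || st.2 != some m then st.1 + 1 else st.1, some m)) (0, none)
  st.1 == (n : Int)

-- ===== PRECONDITION & SPEC =====
def Spec_canUnlockAll2 (boxes : List (List Int)) (out : Bool) : Prop := out = canUnlockAll2_alt boxes
instance (boxes : List (List Int)) (out : Bool) : Decidable (Spec_canUnlockAll2 boxes out) := by
  unfold Spec_canUnlockAll2; infer_instance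

-- ===== CLAIM (what is proved, stated in full; the proofs are below) =====
def Claim_equal_canUnlockAll2 : Prop := ∀ (boxes : List (List Int)), Dom_canUnlockAll2 boxes → Spec_canUnlockAll2 boxes (canUnlockAll2 boxes)

-- ===== LEMMAS AND PROOFS =====

-- inner key-loop of A: membership
theorem mem_inner_fold (n : Int) (bid : Int) (box : List Int) (u : PySem.Set Int) (x : Int) :
    x ∈ box.foldl (fun u key =>
        if key < n && key != bid then PySem.Set.add u key else u) u ↔
      x ∈ u ∨ (x ∈ box ∧ x < n ∧ x ≠ bid) := by
  induction box generalizing u with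
  | nil => simp
  | cons k ks ih =>
    simp only [List.foldl_cons, ih]
    by_cases h : k < n ∧ k ≠ bid
    · rw [if_pos (by simp [h.1, h.2])]
      simp only [PySem.Set.mem_add, List.mem_cons]
      constructor
      · rintro ((hu | rfl) | h2)
        · exact Or.inl hu
        · exact Or.inr ⟨Or.inl rfl, h⟩
        · exact Or.inr ⟨Or.inr h2.1, h2.2⟩
      · rintro (hu | ⟨(rfl | hk), h2⟩)
        · exact Or.inl (Or.inl hu)
        · exact Or.inl (Or.inr rfl)
        · exact Or.inr ⟨hk, h2⟩
    · rw [if_neg (by simpa [Decidable.not_and_iff_or_not] using h)]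
      simp only [List.mem_cons]
      constructor
      · rintro (hu | h2)
        · exact Or.inl hu
        · exact Or.inr ⟨Or.inr h2.1, h2.2⟩
      · rintro (hu | ⟨(rfl | hk), h2⟩)
        · exact Or.inl hu
        · exact absurd h2 (by tauto)
        · exact Or.inr ⟨hk, h2⟩

theorem nodup_inner_fold (n : Int) (bid : Int) (box : List Int) (u : PySem.Set Int)
    (hu : u.Nodup) :
    (box.foldl (fun u key =>
        if key < n && key != bid then PySem.Set.add u key else u) u).Nodup := by
  induction box generalizing u with
  | nil => simpa
  | cons k ks ih =>
    simp only [List.foldl_cons]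
    exact ih _ (by split_ifs <;> [exact PySem.Set.nodup_add _ _ hu; exact hu])

-- one body of A's outer loop
def stepA (n : Int) (u : PySem.Set Int) (p : Int × List Int) : PySem.Set Int :=
  let u := if p.2.length == 0 || p.1 == 0 then PySem.Set.add u p.1 else u
  p.2.foldl (fun u key => if key < n && key != p.1 then PySem.Set.add u key else u) u

-- what one outer-loop body adds
def addedBy (n : Int) (p : Int × List Int) (x : Int) : Prop :=
  ((p.2 = [] ∨ p.1 = 0) ∧ x = p.1) ∨ (x ∈ p.2 ∧ x < n ∧ x ≠ p.1)

theorem mem_stepA (n : Int) (u : PySem.Set Int) (p : Int × List Int) (x : Int) :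
    x ∈ stepA n u p ↔ x ∈ u ∨ addedBy n p x := by
  unfold stepA addedBy
  rw [mem_inner_fold]
  by_cases h : p.2 = [] ∨ p.1 = 0
  · rw [if_pos (by rcases h with h | h <;> simp [h])]
    simp only [PySem.Set.mem_add]
    tauto
  · rw [if_neg (by simpa [not_or] using h)]
    tauto

theorem nodup_stepA (n : Int) (u : PySem.Set Int) (p : Int × List Int) (hu : u.Nodup) :
    (stepA n u p).Nodup := by
  unfold stepA
  exact nodup_inner_fold _ _ _ _ (by split_ifs <;> [exact PySem.Set.nodup_add _ _ hu; exact hu])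

theorem mem_foldl_stepA (n : Int) (l : List (Int × List Int)) (u : PySem.Set Int) (x : Int) :
    x ∈ l.foldl (stepA n) u ↔ x ∈ u ∨ ∃ p ∈ l, addedBy n p x := by
  induction l generalizing u with
  | nil => simp
  | cons p ps ih => simp only [List.foldl_cons, ih, mem_stepA, List.exists_mem_cons_iff]; tauto

theorem nodup_foldl_stepA (n : Int) (l : List (Int × List Int)) (u : PySem.Set Int)
    (hu : u.Nodup) : (l.foldl (stepA n) u).Nodup := by
  induction l generalizing u with
  | nil => simpa
  | cons p ps ih => exact ih _ (nodup_stepA n u p hu)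

-- A's unlocked set, named
def unlockedA (boxes : List (List Int)) : PySem.Set Int :=
  (PySem.List.enumerate boxes 0).foldl (stepA (boxes.length : Int)) PySem.Set.empty

-- B's marker list, named
def marksB (boxes : List (List Int)) : List Int :=
  ((PySem.List.enumerate boxes 0).filter (fun p => p.1 == 0 || p.2.isEmpty)).map (fun p => p.1)
    ++ (PySem.List.enumerate boxes 0).flatMap
      (fun p => p.2.filter (fun k => k < (boxes.length : Int) && k != p.1))

theorem mem_marksB (boxes : List (List Int)) (x : Int) :
    x ∈ marksB boxes ↔
      ∃ p ∈ PySem.List.enumerate boxes 0, addedBy (boxes.length : Int) p x := by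
  unfold marksB addedBy
  simp only [List.mem_append, List.mem_map, List.mem_filter, List.mem_flatMap,
    Bool.or_eq_true, beq_iff_eq, List.isEmpty_iff, Bool.and_eq_true, decide_eq_true_eq,
    bne_iff_ne, ne_eq]
  constructor
  · rintro (⟨p, ⟨hp, hc⟩, rfl⟩ | ⟨p, hp, hm, hlt, hne⟩)
    · exact ⟨p, hp, Or.inl ⟨hc.symm.imp (fun h => h) (fun h => h), rfl⟩⟩
    · exact ⟨p, hp, Or.inr ⟨hm, hlt, hne⟩⟩
  · rintro ⟨p, hp, ⟨hc, rfl⟩ | ⟨hm, hlt, hne⟩⟩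
    · exact Or.inl ⟨p, ⟨hp, hc.symm.imp (fun h => h) (fun h => h)⟩, rfl⟩
    · exact Or.inr ⟨p, hp, hm, hlt, hne⟩

theorem mem_unlockedA_marksB (boxes : List (List Int)) (x : Int) :
    x ∈ unlockedA boxes ↔ x ∈ marksB boxes := by
  rw [unlockedA, mem_foldl_stepA, mem_marksB]
  simp [PySem.Set.empty]

-- the adjacent-run scan, as a recursion
def countNew : List Int → Option Int → Nat
  | [], _ => 0
  | x :: xs, prev => (if prev = some x then 0 else 1) + countNew xs (some x)

theorem foldl_scan_eq (l : List Int) (c : Int) (prev : Option Int) :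
    (l.foldl (fun (st : Int × Option Int) m =>
        (if st.2.isNone || st.2 != some m then st.1 + 1 else st.1, some m)) (c, prev)).1 =
      c + (countNew l prev : Int) := by
  induction l generalizing c prev with
  | nil => simp [countNew]
  | cons x xs ih =>
    simp only [List.foldl_cons, countNew]
    rcases prev with _ | p
    · rw [if_pos (by simp), ih, if_neg (by simp)]
      push_cast
      ring
    · by_cases h : p = x
      · subst h
        rw [if_neg (by simp), ih, if_pos rfl]
        push_cast
        ring
      · rw [if_pos (by simp [h]), ih, if_neg (by simp [h])]
        push_cast
        ring

theorem countNew_some (l : List Int) (h : l.Pairwise (· ≤ ·)) (a : Int)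
    (ha : ∀ y ∈ l, a ≤ y) :
    countNew l (some a) = (l.toFinset.erase a).card := by
  induction l generalizing a with
  | nil => simp [countNew]
  | cons x xs ih =>
    rw [List.pairwise_cons] at h
    have hax : a ≤ x := ha x (List.mem_cons_self)
    rw [countNew, ih h.2 x h.1, List.toFinset_cons]
    by_cases hxa : a = x
    · rw [if_pos (by rw [hxa]), hxa, Finset.erase_insert_eq_erase]
      omega
    · have hnotin : a ∉ xs.toFinset := by
        rw [List.mem_toFinset]
        intro hmem
        have := h.1 a hmem
        omega
      rw [if_neg (by simpa using hxa), Finset.erase_insert_of_ne (Ne.symm hxa),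
        Finset.erase_eq_of_notMem hnotin]
      by_cases hx : x ∈ xs.toFinset
      · rw [Finset.insert_eq_self.mpr hx]
        have := Finset.card_erase_add_one hx
        omega
      · rw [Finset.card_insert_of_notMem hx, Finset.erase_eq_of_notMem hx]
        omega

theorem countNew_none (l : List Int) (h : l.Pairwise (· ≤ ·)) :
    countNew l none = l.toFinset.card := by
  cases l with
  | nil => simp [countNew]
  | cons x xs =>
    rw [List.pairwise_cons] at h
    rw [countNew, countNew_some xs h.2 x h.1, if_neg (by simp), List.toFinset_cons]
    by_cases hx : x ∈ xs.toFinset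
    · rw [Finset.insert_eq_self.mpr hx]
      have := Finset.card_erase_add_one hx
      omega
    · rw [Finset.card_insert_of_notMem hx, Finset.erase_eq_of_notMem hx]
      omega

theorem A_iff (boxes : List (List Int)) :
    canUnlockAll2 boxes = true ↔ (unlockedA boxes).length = boxes.length := by
  have ha : canUnlockAll2 boxes =
      (if PySem.Set.len (unlockedA boxes) == ((boxes.length : Int)) then true else false) := rfl
  rw [ha]
  unfold PySem.Set.len
  split_ifs with h
  · rw [beq_iff_eq] at h
    constructor
    · intro _; exact_mod_cast h
    · intro _; rfl
  · rw [beq_iff_eq] at h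
    constructor
    · intro hc; simp at hc
    · intro hc; exact absurd (by exact_mod_cast hc) h

theorem B_iff (boxes : List (List Int)) :
    canUnlockAll2_alt boxes = true ↔ (unlockedA boxes).length = boxes.length := by
  have hb : canUnlockAll2_alt boxes =
      (((PySem.List.sorted (marksB boxes) (fun x => x) false).foldl
          (fun (st : Int × Option Int) m =>
            (if st.2.isNone || st.2 != some m then st.1 + 1 else st.1, some m))
          ((0 : Int), (none : Option Int))).1 == (boxes.length : Int)) := rfl
  rw [hb]
  rw [foldl_scan_eq]
  have hpw : (PySem.List.sorted (marksB boxes) (fun x => x) false).Pairwise (· ≤ ·) := by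
    simpa using PySem.List.sorted_pairwise (marksB boxes) (fun x => x)
  rw [countNew_none _ hpw]
  have hfs : (PySem.List.sorted (marksB boxes) (fun x => x) false).toFinset =
      (unlockedA boxes).toFinset := by
    apply Finset.ext
    intro x
    rw [List.mem_toFinset, List.mem_toFinset, PySem.List.mem_sorted, mem_unlockedA_marksB]
  have hnd : (unlockedA boxes).Nodup :=
    nodup_foldl_stepA _ _ _ (by simp [PySem.Set.empty])
  rw [hfs, List.toFinset_card_of_nodup hnd]
  constructor
  · intro h
    rw [beq_iff_eq] at h
    omega
  · intro h
    rw [beq_iff_eq]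
    omega

-- ===== VERDICT (by name: the statement is the Claim_ definition above) =====
theorem canUnlockAll2_spec : Claim_equal_canUnlockAll2 := by
  intro boxes _
  unfold Spec_canUnlockAll2
  exact Bool.eq_iff_iff.mpr ((A_iff boxes).trans (B_iff boxes).symm)
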